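-- pv_equiv track=rewrite | github.com/miliar/Code_Jam_Webscraper | solutions_python/solutions_year10_round1_nr3/31.py | ngame
-- ===== SOURCE A (Python) =====
-- def ngame(a, b):
--     if a==b:
--         return False
--     if a > b:
--         tmp = a
--         a = b
--         b = tmp
--     if b >= 2*a:
--         return True
--     else:
--         return not ngame(a,b-a)
-- ===== SOURCE B (Python) =====
-- def ngame(a, b):
--     if a == b:
--         return False
--     lo, hi = (a, b) if a < b else (b, a)
--     if lo <= 0:
--         return True
--     return hi * hi > lo * hi + lo * lo
-- ===== Notes on version B (the rewrite author's own statement) =====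
-- stated objective: faster
-- what changed: Replaces the recursive subtraction game by the golden-ratio closed form: after sorting, the position is winning iff min<=0 (with a!=b) or max^2 > min*max + min^2.
import Mathlib
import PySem

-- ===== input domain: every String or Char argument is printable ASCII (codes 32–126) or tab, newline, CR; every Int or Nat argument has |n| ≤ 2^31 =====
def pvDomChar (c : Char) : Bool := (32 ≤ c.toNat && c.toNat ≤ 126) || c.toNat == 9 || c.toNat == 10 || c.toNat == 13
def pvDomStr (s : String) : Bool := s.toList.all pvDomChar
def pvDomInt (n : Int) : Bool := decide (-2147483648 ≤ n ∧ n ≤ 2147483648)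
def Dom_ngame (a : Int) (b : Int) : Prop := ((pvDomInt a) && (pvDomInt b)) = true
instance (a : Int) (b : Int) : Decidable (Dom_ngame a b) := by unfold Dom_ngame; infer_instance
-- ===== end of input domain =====

-- B replaces A's recursion by the golden-ratio closed form (sort, then one arithmetic test); O(1) instead of O(b/a).
-- ===== PORT A =====
def ngame (a : Int) (b : Int) : Bool :=
  if a = b then false
  else
    -- "if a > b: swap"
    let a' := if a > b then b else a
    let b' := if a > b then a else b
    if b' ≥ 2 * a' then true
    else !(ngame a' (b' - a'))
termination_by (a + b).toNat
decreasing_by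
  simp only [a', b'] at *
  split_ifs at * <;> omega

-- ===== PORT B =====
def ngame_alt (a : Int) (b : Int) : Bool :=
  if a = b then false
  else
    let lo := if a < b then a else b
    let hi := if a < b then b else a
    if lo ≤ 0 then true
    else decide (hi * hi > lo * hi + lo * lo)

-- ===== PRECONDITION & SPEC =====
def Spec_ngame (a : Int) (b : Int) (out : Bool) : Prop := out = ngame_alt a b
instance (a : Int) (b : Int) (out : Bool) : Decidable (Spec_ngame a b out) := by unfold Spec_ngame; infer_instance

-- ===== CLAIM (what is proved, stated in full; the proofs are below) =====
def Claim_equal_ngame : Prop := ∀ (a : Int) (b : Int), Dom_ngame a b → Spec_ngame a b (ngame a b)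

-- ===== LEMMAS AND PROOFS =====

-- b² - ab - a² is never zero for positive integers (propagated down the subtraction descent).
theorem pvX_ne_zero : ∀ a b : Int, 0 < a → 0 < b →
    (if a < b then b else a) * (if a < b then b else a)
      - (if a < b then a else b) * (if a < b then b else a)
      - (if a < b then a else b) * (if a < b then a else b) ≠ 0 := by
  intro a b
  induction a, b using ngame.induct with
  | case1 a =>
    intro ha _
    simp only [if_neg (lt_irrefl a)]
    nlinarith
  | case2 a b h a2 b2 h2 =>
    intro ha hb
    simp only [a2, b2, dite_eq_ite, gt_iff_lt] at h2
    rcases lt_trichotomy a b with hab | hab | hab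
    · simp only [if_pos hab]
      rw [if_neg (by omega), if_neg (by omega)] at h2
      nlinarith
    · exact absurd hab h
    · simp only [if_neg (show ¬ a < b by omega)]
      rw [if_pos (by omega), if_pos (by omega)] at h2
      nlinarith
  | case3 a b h a2 b2 h2 ih =>
    intro ha hb
    simp only [a2, b2, dite_eq_ite, gt_iff_lt] at h2 ih
    rcases lt_trichotomy a b with hab | hab | hab
    · rw [if_neg (by omega), if_neg (by omega)] at h2
      rw [if_neg (by omega : ¬ b < a), if_neg (by omega : ¬ b < a)] at ih
      have hlo : 0 < a := by omega
      have := ih (by omega) (by omega)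
      simp only [if_neg (show ¬ a < b - a by omega)] at this
      simp only [if_pos hab]
      intro hz; apply this; nlinarith
    · exact absurd hab h
    · rw [if_pos (by omega), if_pos (by omega)] at h2
      rw [if_pos (by omega : b < a), if_pos (by omega : b < a)] at ih
      have := ih (by omega) (by omega)
      simp only [if_neg (show ¬ b < a - b by omega)] at this
      simp only [if_neg (show ¬ a < b by omega)]
      intro hz; apply this; nlinarith

theorem ngame_eq_alt : ∀ a b : Int, ngame a b = ngame_alt a b := by
  intro a b
  induction a, b using ngame.induct with
  | case1 a =>
    rw [ngame, ngame_alt]; simp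
  | case2 a b h a2 b2 h2 =>
    simp only [a2, b2, dite_eq_ite, gt_iff_lt] at h2
    rcases lt_trichotomy a b with hab | hab | hab
    · rw [if_neg (by omega), if_neg (by omega)] at h2
      rw [ngame, ngame_alt]
      simp only [gt_iff_lt, if_neg (show ¬ b < a by omega), if_neg h, if_pos h2,
        if_pos hab]
      by_cases hlo : a ≤ 0
      · rw [if_pos hlo]
      · rw [if_neg hlo]
        have : b * b > a * b + a * a := by nlinarith
        simp [this]
    · exact absurd hab h
    · rw [if_pos (by omega), if_pos (by omega)] at h2
      rw [ngame, ngame_alt]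
      simp only [gt_iff_lt, if_pos (show b < a by omega), if_neg h, if_pos h2,
        if_neg (show ¬ a < b by omega)]
      by_cases hlo : b ≤ 0
      · rw [if_pos hlo]
      · rw [if_neg hlo]
        have : a * a > b * a + b * b := by nlinarith
        simp [this]
  | case3 a b h a2 b2 h2 ih =>
    simp only [a2, b2, dite_eq_ite, gt_iff_lt] at h2 ih
    rcases lt_trichotomy a b with hab | hab | hab
    · rw [if_neg (by omega), if_neg (by omega)] at h2
      rw [if_neg (by omega : ¬ b < a), if_neg (by omega : ¬ b < a)] at ih
      have hlo : 0 < a := by omega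
      rw [ngame]
      simp only [gt_iff_lt, if_neg (show ¬ b < a by omega), if_neg h,
        if_neg (show ¬ b ≥ 2 * a by omega)]
      rw [ih]
      rw [ngame_alt, ngame_alt]
      simp only [if_neg (show ¬ a = b - a by omega), if_neg (show ¬ a < b - a by omega),
        if_neg (show ¬ b - a ≤ 0 by omega), if_neg h, if_pos hab,
        if_neg (show ¬ a ≤ 0 by omega)]
      have hne := pvX_ne_zero a b hlo (by omega)
      rw [if_pos hab, if_pos hab] at hne
      by_cases hw : b * b > a * b + a * a
      · have : ¬ (a * a > (b - a) * a + (b - a) * (b - a)) := by nlinarith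
        simp [hw, this]
      · have : a * a > (b - a) * a + (b - a) * (b - a) := by
          rcases lt_or_gt_of_ne hne with hx | hx
          · nlinarith
          · exact absurd (by nlinarith) hw
        simp [hw, this]
    · exact absurd hab h
    · rw [if_pos (by omega), if_pos (by omega)] at h2
      rw [if_pos (by omega : b < a), if_pos (by omega : b < a)] at ih
      have hlo : 0 < b := by omega
      rw [ngame]
      simp only [gt_iff_lt, if_pos (show b < a by omega), if_neg h,
        if_neg (show ¬ a ≥ 2 * b by omega)]
      rw [ih]
      rw [ngame_alt, ngame_alt]
      simp only [if_neg (show ¬ b = a - b by omega), if_neg (show ¬ b < a - b by omega),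
        if_neg (show ¬ a - b ≤ 0 by omega), if_neg h, if_neg (show ¬ a < b by omega),
        if_neg (show ¬ b ≤ 0 by omega)]
      have hne := pvX_ne_zero a b (by omega) hlo
      rw [if_neg (show ¬ a < b by omega), if_neg (show ¬ a < b by omega)] at hne
      by_cases hw : a * a > b * a + b * b
      · have : ¬ (b * b > (a - b) * b + (a - b) * (a - b)) := by nlinarith
        simp [hw, this]
      · have : b * b > (a - b) * b + (a - b) * (a - b) := by
          rcases lt_or_gt_of_ne hne with hx | hx
          · nlinarith
          · exact absurd (by nlinarith) hw
        simp [hw, this]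

-- ===== VERDICT (by name: the statement is the Claim_ definition above) =====
theorem ngame_spec : Claim_equal_ngame := by
  intro a b _
  unfold Spec_ngame
  exact ngame_eq_alt a b
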